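-- pv_equiv track=rewrite | github.com/HBayt/RaspPi | app.py | recherche_utilisateurs
-- ===== SOURCE A (Python) =====
-- utilisateurs = [
--     {"nom": "admin", "courriel": "admin@mail.com", "mdp": "1234"},
--     {"nom": "Paul", "courriel": "paul@mail.com", "mdp": "1234"},
--     {"nom": "Marie", "courriel": "marie@mail.com", "mdp": "1234"},
-- ]
--
-- def recherche_utilisateurs(mot_de_passe, adresse_mail):
--     for utilisateur in utilisateurs:
--         #  if utilisateur['nom'] == nom_utilisateur and
--         if (
--             utilisateur["mdp"] == mot_de_passe
--             and utilisateur["courriel"] == adresse_mail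
--         ):
--             return utilisateur
--     return None
-- ===== SOURCE B (Python) =====
-- utilisateurs = [
--     {"nom": "admin", "courriel": "admin@mail.com", "mdp": "1234"},
--     {"nom": "Paul", "courriel": "paul@mail.com", "mdp": "1234"},
--     {"nom": "Marie", "courriel": "marie@mail.com", "mdp": "1234"},
-- ]
--
-- _index = {}
-- for _u in utilisateurs:
--     _index.setdefault((_u["courriel"], _u["mdp"]), _u)
--
--
-- def recherche_utilisateurs(mot_de_passe, adresse_mail):
--     return _index.get((adresse_mail, mot_de_passe))
-- ===== Notes on version B (the rewrite author's own statement) =====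
-- stated objective: idiomatic
-- what changed: Replaces the per-call linear scan over the user list with a dict keyed by (courriel, mdp) built once at module load (setdefault preserves first-match), so the function body is a single index.get.
import Mathlib
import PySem

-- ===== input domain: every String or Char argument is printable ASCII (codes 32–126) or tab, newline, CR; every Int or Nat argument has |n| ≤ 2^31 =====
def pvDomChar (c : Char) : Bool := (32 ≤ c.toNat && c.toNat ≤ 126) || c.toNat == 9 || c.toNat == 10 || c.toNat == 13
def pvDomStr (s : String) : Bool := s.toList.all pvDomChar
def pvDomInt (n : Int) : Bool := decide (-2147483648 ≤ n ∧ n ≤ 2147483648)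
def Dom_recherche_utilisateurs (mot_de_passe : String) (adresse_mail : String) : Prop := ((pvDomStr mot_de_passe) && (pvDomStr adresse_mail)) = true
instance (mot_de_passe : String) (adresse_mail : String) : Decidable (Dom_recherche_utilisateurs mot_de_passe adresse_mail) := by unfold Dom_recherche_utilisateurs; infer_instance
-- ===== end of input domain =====

-- B replaces A's per-call linear scan with a (courriel, mdp)-keyed dict built once (setdefault = first match wins) and a single lookup; objective: idiomatic.


-- module constant `utilisateurs` (each user dict as a PySem.Dict)
def pvUtilisateurs : List (PySem.Dict String String) :=
  [ PySem.Dict.ofList [("nom", "admin"), ("courriel", "admin@mail.com"), ("mdp", "1234")],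
    PySem.Dict.ofList [("nom", "Paul"), ("courriel", "paul@mail.com"), ("mdp", "1234")],
    PySem.Dict.ofList [("nom", "Marie"), ("courriel", "marie@mail.com"), ("mdp", "1234")] ]

-- ===== PORT A =====
-- the `for utilisateur in utilisateurs` loop (keys "mdp"/"courriel" are present in every record, so u[k] == x is get? = some x)
def pvLoopA (mot_de_passe adresse_mail : String) : List (PySem.Dict String String) → Option (List (String × String))
  | [] => none
  | u :: rest =>
      if u.get? "mdp" = some mot_de_passe ∧ u.get? "courriel" = some adresse_mail then
        some u.items
      else pvLoopA mot_de_passe adresse_mail rest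

def recherche_utilisateurs (mot_de_passe : String) (adresse_mail : String) : Option (List (String × String)) :=
  pvLoopA mot_de_passe adresse_mail pvUtilisateurs

-- ===== PORT B =====
-- `_index` built once at module load: setdefault over (courriel, mdp) keys
def pvIndex : PySem.Dict (String × String) (List (String × String)) :=
  pvUtilisateurs.foldl
    (fun d u => d.setdefault ((u.get? "courriel").getD "", (u.get? "mdp").getD "") u.items)
    PySem.Dict.empty

def recherche_utilisateurs_alt (mot_de_passe : String) (adresse_mail : String) : Option (List (String × String)) :=
  pvIndex.get? (adresse_mail, mot_de_passe)

-- ===== PRECONDITION & SPEC =====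
def Spec_recherche_utilisateurs (mot_de_passe : String) (adresse_mail : String) (out : Option (List (String × String))) : Prop := out = recherche_utilisateurs_alt mot_de_passe adresse_mail
instance (mot_de_passe : String) (adresse_mail : String) (out : Option (List (String × String))) : Decidable (Spec_recherche_utilisateurs mot_de_passe adresse_mail out) := by unfold Spec_recherche_utilisateurs; infer_instance

-- ===== CLAIM (what is proved, stated in full; the proofs are below) =====
def Claim_equal_recherche_utilisateurs : Prop := ∀ (mot_de_passe : String) (adresse_mail : String), Dom_recherche_utilisateurs mot_de_passe adresse_mail → Spec_recherche_utilisateurs mot_de_passe adresse_mail (recherche_utilisateurs mot_de_passe adresse_mail)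

-- ===== LEMMAS AND PROOFS =====
theorem pvIndex_eq :
    pvIndex = PySem.Dict.mk
      [ (("admin@mail.com", "1234"), [("nom", "admin"), ("courriel", "admin@mail.com"), ("mdp", "1234")]),
        (("paul@mail.com", "1234"), [("nom", "Paul"), ("courriel", "paul@mail.com"), ("mdp", "1234")]),
        (("marie@mail.com", "1234"), [("nom", "Marie"), ("courriel", "marie@mail.com"), ("mdp", "1234")]) ] := by
  decide

theorem pvUtilisateurs_eq :
    pvUtilisateurs =
      [ PySem.Dict.mk [("nom", "admin"), ("courriel", "admin@mail.com"), ("mdp", "1234")],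
        PySem.Dict.mk [("nom", "Paul"), ("courriel", "paul@mail.com"), ("mdp", "1234")],
        PySem.Dict.mk [("nom", "Marie"), ("courriel", "marie@mail.com"), ("mdp", "1234")] ] := by
  decide

theorem pv_main (m a : String) :
    recherche_utilisateurs m a = recherche_utilisateurs_alt m a := by
  unfold recherche_utilisateurs recherche_utilisateurs_alt
  rw [pvIndex_eq, pvUtilisateurs_eq]
  simp only [pvLoopA, PySem.Dict.get?_mk_cons]
  by_cases h1 : m = "1234"
  · subst h1
    by_cases ha1 : a = "admin@mail.com"
    · subst ha1; decide
    · by_cases ha2 : a = "paul@mail.com"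
      · subst ha2; decide
      · by_cases ha3 : a = "marie@mail.com"
        · subst ha3; decide
        · simp [Ne.symm ha1, Ne.symm ha2, Ne.symm ha3, Prod.ext_iff, PySem.Dict.get?]
  · simp [Ne.symm h1, Prod.ext_iff, PySem.Dict.get?]

-- ===== VERDICT (by name: the statement is the Claim_ definition above) =====
theorem recherche_utilisateurs_spec : Claim_equal_recherche_utilisateurs := by
  intro m a _
  unfold Spec_recherche_utilisateurs
  exact pv_main m a
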